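-- pv_equiv track=rewrite | github.com/janepan9917/overthinking-the-truth | data/cot_data_generation/analysis.py | get_overthinking_step
-- ===== SOURCE A (Python) =====
-- def get_overthinking_step(answer_trajectory, gt_solution):
--     # if initial direct prompt was wrong
--     if answer_trajectory[0] != gt_solution:
--         return None
--
--     # if the answer trajectory was correct to start with...
--     correct = True
--     step = None
--     for i, answer in enumerate(answer_trajectory[1:]):
--         # if the answer switches to wrong answer
--         if answer != gt_solution and correct:
--             correct = False
--             step = i+1
--
--         # if the answer swaps back to the correct answer from having been incorrect
--         elif answer == gt_solution and not correct:
--             return None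
--
--     return step
-- ===== SOURCE B (Python) =====
-- def get_overthinking_step(answer_trajectory, gt_solution):
--     # phase guard: trajectory must start correct
--     if answer_trajectory[0] != gt_solution:
--         return None
--     # phase 1: find the first deviation; phase 2: the whole suffix after it must stay wrong
--     for i in range(1, len(answer_trajectory)):
--         if answer_trajectory[i] != gt_solution:
--             return None if gt_solution in answer_trajectory[i + 1:] else i
--     return None
-- ===== Notes on version B (the rewrite author's own statement) =====
-- stated objective: simpler
-- what changed: Replaces A's single interleaved state-machine pass carrying (correct, step) flags with a two-phase scan: find the first index >= 1 that deviates from gt_solution, then return it only if no later element equals gt_solution.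
import Mathlib
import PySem

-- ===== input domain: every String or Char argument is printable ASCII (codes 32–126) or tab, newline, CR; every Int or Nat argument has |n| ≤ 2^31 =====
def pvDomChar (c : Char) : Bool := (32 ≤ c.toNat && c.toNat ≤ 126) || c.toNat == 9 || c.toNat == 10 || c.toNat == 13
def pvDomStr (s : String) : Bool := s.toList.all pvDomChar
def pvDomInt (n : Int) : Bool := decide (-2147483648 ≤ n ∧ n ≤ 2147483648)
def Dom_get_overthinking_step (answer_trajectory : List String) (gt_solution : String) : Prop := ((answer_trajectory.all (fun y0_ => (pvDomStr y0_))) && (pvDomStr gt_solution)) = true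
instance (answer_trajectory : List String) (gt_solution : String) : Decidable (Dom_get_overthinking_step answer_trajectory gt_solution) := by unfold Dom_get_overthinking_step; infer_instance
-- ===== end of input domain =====

-- B replaces A's interleaved correct/step state machine with two phases (find first deviation, then
-- verify the suffix stays wrong); objective: simpler.

-- ===== PORT A =====
-- the for-loop over enumerate(answer_trajectory[1:]) with state (correct, step) and early return None
def pvA_loop (gt_solution : String) : List (Int × String) → Bool → Option Int → Option Int
  | [], _, step => step
  | (i, answer) :: rest, correct, step =>
    if answer ≠ gt_solution ∧ correct then
      pvA_loop gt_solution rest false (some (i + 1))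
    else if answer = gt_solution ∧ ¬ correct then
      none
    else
      pvA_loop gt_solution rest correct step

def get_overthinking_step (answer_trajectory : List String) (gt_solution : String) : Option Int :=
  match PySem.List.pyGet? answer_trajectory 0 with
  | none => none   -- IndexError on the empty list; excluded by Pre_
  | some a0 =>
    if a0 ≠ gt_solution then none
    else
      pvA_loop gt_solution
        (PySem.List.enumerate (PySem.List.slice answer_trajectory (some 1) none) 0) true none

-- ===== PORT B =====
-- the for-loop over range(1, len(answer_trajectory)) with its early returns
def pvB_loop (answer_trajectory : List String) (gt_solution : String) : List Int → Option Int
  | [] => none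
  | i :: is =>
    if PySem.List.pyGetD answer_trajectory i "" ≠ gt_solution then
      if gt_solution ∈ PySem.List.slice answer_trajectory (some (i + 1)) none then none
      else some i
    else pvB_loop answer_trajectory gt_solution is

def get_overthinking_step_alt (answer_trajectory : List String) (gt_solution : String) : Option Int :=
  match PySem.List.pyGet? answer_trajectory 0 with
  | none => none   -- IndexError on the empty list; excluded by Pre_
  | some a0 =>
    if a0 ≠ gt_solution then none
    else
      pvB_loop answer_trajectory gt_solution
        (PySem.List.pyRange 1 answer_trajectory.length 1)

-- ===== PRECONDITION & SPEC =====
-- A raises IndexError on the empty list (answer_trajectory[0]); excluded.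
def Pre_get_overthinking_step (answer_trajectory : List String) (gt_solution : String) : Prop :=
  answer_trajectory ≠ []
instance (answer_trajectory : List String) (gt_solution : String) : Decidable (Pre_get_overthinking_step answer_trajectory gt_solution) := by unfold Pre_get_overthinking_step; infer_instance

def pvWitness_get_overthinking_step : List String × String := (["7", "7", "8"], "7")

def Spec_get_overthinking_step (answer_trajectory : List String) (gt_solution : String) (out : Option Int) : Prop := out = get_overthinking_step_alt answer_trajectory gt_solution
instance (answer_trajectory : List String) (gt_solution : String) (out : Option Int) : Decidable (Spec_get_overthinking_step answer_trajectory gt_solution out) := by unfold Spec_get_overthinking_step; infer_instance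

-- ===== CLAIM (what is proved, stated in full; the proofs are below) =====
def Claim_equal_get_overthinking_step : Prop := ∀ (answer_trajectory : List String) (gt_solution : String), Dom_get_overthinking_step answer_trajectory gt_solution → Pre_get_overthinking_step answer_trajectory gt_solution → Spec_get_overthinking_step answer_trajectory gt_solution (get_overthinking_step answer_trajectory gt_solution)

-- ===== LEMMAS AND PROOFS =====

theorem pvA_loop_false (gt : String) (rest : List String) (j s : Int) :
    pvA_loop gt (PySem.List.enumerate rest j) false (some s)
      = if gt ∈ rest then none else some s := by
  induction rest generalizing j with
  | nil => simp [PySem.List.enumerate_nil, pvA_loop]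
  | cons a rest ih =>
    rw [PySem.List.enumerate_cons]
    by_cases h : a = gt
    · simp [pvA_loop, h]
    · simp [pvA_loop, h, ih, Ne.symm h]

theorem pvAB_loop (gt : String) (pre suf : List String) :
    pvA_loop gt (PySem.List.enumerate suf ((pre.length : Int) - 1)) true none
      = pvB_loop (pre ++ suf) gt
          (PySem.List.pyRange (pre.length : Int) ((pre ++ suf).length : Int) 1) := by
  induction suf generalizing pre with
  | nil =>
    rw [List.append_nil, PySem.List.pyRange_one_eq_nil (le_refl _)]
    simp [PySem.List.enumerate_nil, pvA_loop, pvB_loop]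
  | cons a suf ih =>
    rw [PySem.List.enumerate_cons,
      PySem.List.pyRange_one_cons (by simp)]
    have hget : PySem.List.pyGetD (pre ++ a :: suf) (pre.length : Int) "" = a := by
      rw [PySem.List.pyGetD_natCast]
      simp [List.getD]
    have hslice : PySem.List.slice (pre ++ a :: suf) (some ((pre.length : Int) + 1)) none = suf := by
      have : ((pre.length : Int) + 1) = ((pre.length + 1 : Nat) : Int) := by push_cast; ring
      rw [this, PySem.List.slice_from_natCast,
        show pre.length + 1 = (pre ++ [a]).length by simp,
        show pre ++ a :: suf = (pre ++ [a]) ++ suf by simp,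
        List.drop_left]
    by_cases h : a = gt
    · subst h
      have hIH := ih (pre ++ [a])
      simp only [List.length_append, List.length_cons, List.length_nil, List.append_assoc,
        List.cons_append, List.nil_append] at hIH
      push_cast at hIH
      simp [pvA_loop, pvB_loop, hget]
      ring_nf
      ring_nf at hIH
      exact hIH
    · simp only [pvA_loop, pvB_loop, hget]
      simp only [ne_eq, h, not_false_eq_true, true_and, if_true, hslice]
      rw [show (pre.length : Int) - 1 + 1 = (pre.length : Int) by ring]
      exact pvA_loop_false gt suf _ _

-- ===== VERDICT (by name: the statement is the Claim_ definition above) =====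
theorem get_overthinking_step_spec : Claim_equal_get_overthinking_step := by
  intro traj gt _ hpre
  unfold Spec_get_overthinking_step
  match traj with
  | [] => exact absurd rfl hpre
  | a0 :: tl =>
    unfold get_overthinking_step get_overthinking_step_alt
    have h0 : PySem.List.pyGet? (a0 :: tl) (0 : Int) = some a0 := by
      simp [PySem.List.pyGet?, PySem.List.pyIdx?]
    rw [h0]
    by_cases hg : a0 = gt
    · subst hg
      simp only [ne_eq, not_true_eq_false, ite_false]
      rw [PySem.List.slice_from_one]
      have h := pvAB_loop a0 [a0] tl
      simpa using h
    · simp [hg]
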